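-- pv_equiv track=rewrite | github.com/MasterMedo/aoc | 2015/day/05.py | isNice2
-- ===== SOURCE A (Python) =====
-- def isNice2(str):
--     if sum([1 for i in range(len(str)-3) \
--             for j in range(i+2, len(str)-1) \
--             if str[i]+str[i+1] == str[j]+str[j+1]]) < 1 \
--             or sum([1 for i in range(len(str)-2) \
--             if str[i] == str[i+2]]) < 1:
--         return False
--     return True
-- ===== SOURCE B (Python) =====
-- def isNice2(str):
--     first = {}
--     has_pair = False
--     has_sandwich = False
--     for k in range(len(str) - 1):
--         p = str[k:k + 2]
--         if p in first:
--             if first[p] <= k - 2: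
--                 has_pair = True
--         else:
--             first[p] = k
--         if k >= 1 and str[k - 1] == str[k + 1]:
--             has_sandwich = True
--     return has_pair and has_sandwich
-- ===== Notes on version B (the rewrite author's own statement) =====
-- stated objective: faster
-- what changed: Replaced the quadratic nested-range scan for a repeated pair by a single left-to-right pass that stores the first index of each 2-char substring in a dict and checks non-overlap, folding the sandwich-letter test into the same pass.
import Mathlib
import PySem

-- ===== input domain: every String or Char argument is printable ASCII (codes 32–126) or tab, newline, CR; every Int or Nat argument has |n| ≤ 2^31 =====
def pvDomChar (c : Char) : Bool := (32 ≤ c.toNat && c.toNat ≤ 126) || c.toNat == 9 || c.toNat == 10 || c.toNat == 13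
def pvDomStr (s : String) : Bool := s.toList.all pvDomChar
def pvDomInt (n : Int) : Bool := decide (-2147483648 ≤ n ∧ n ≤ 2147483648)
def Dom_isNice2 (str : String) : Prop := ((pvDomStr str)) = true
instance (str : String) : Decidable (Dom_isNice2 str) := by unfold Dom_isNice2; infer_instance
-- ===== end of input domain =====

-- B replaces A's quadratic nested scan for a repeated pair by one left-to-right pass that keeps
-- the first index of every 2-char substring in a dict (objective: faster).

-- ===== PORT A =====
-- str[i]+str[i+1] == str[j]+str[j+1] (concatenation of two 1-char strings) is ported as
-- componentwise equality of the two character pairs — exact for single characters.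
def isNice2 (str : String) : Bool :=
  let s := str.toList
  let n : Int := (s.length : Int)
  let sum1 : Int :=
    ((PySem.List.pyRange 0 (n - 3) 1).flatMap (fun i =>
      (((PySem.List.pyRange (i + 2) (n - 1) 1).filter (fun j =>
        (PySem.List.pyGet? s i, PySem.List.pyGet? s (i + 1)) ==
        (PySem.List.pyGet? s j, PySem.List.pyGet? s (j + 1)))).map (fun _ => (1 : Int))))).sum
  let sum2 : Int :=
    (((PySem.List.pyRange 0 (n - 2) 1).filter (fun i =>
        PySem.List.pyGet? s i == PySem.List.pyGet? s (i + 2))).map (fun _ => (1 : Int))).sum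
  if sum1 < 1 || sum2 < 1 then false else true

-- ===== PORT B =====
def isNice2_alt (str : String) : Bool :=
  let s := str.toList
  let n : Int := (s.length : Int)
  let st :=
    (PySem.List.pyRange 0 (n - 1) 1).foldl
      (fun (st : PySem.Dict (List Char) Int × Bool × Bool) k =>
        let p := PySem.List.slice s (some k) (some (k + 2))
        let fp :=
          if PySem.Dict.contains st.1 p then
            (st.1, if PySem.Dict.getD st.1 p 0 ≤ k - 2 then true else st.2.1)
          else
            (PySem.Dict.insert st.1 p k, st.2.1)
        let hs :=
          if 1 ≤ k ∧ PySem.List.pyGet? s (k - 1) = PySem.List.pyGet? s (k + 1) then true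
          else st.2.2
        (fp.1, fp.2, hs))
      (PySem.Dict.empty, false, false)
  st.2.1 && st.2.2

-- ===== PRECONDITION & SPEC =====
def Spec_isNice2 (str : String) (out : Bool) : Prop := out = isNice2_alt str
instance (str : String) (out : Bool) : Decidable (Spec_isNice2 str out) := by unfold Spec_isNice2; infer_instance

-- ===== CLAIM (what is proved, stated in full; the proofs are below) =====
def Claim_equal_isNice2 : Prop := ∀ (str : String), Dom_isNice2 str → Spec_isNice2 str (isNice2 str)

-- ===== LEMMAS AND PROOFS =====

-- the 2-character substring str[k:k+2] that B's loop forms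
def pairAt (s : List Char) (k : Nat) : List Char :=
  PySem.List.slice s (some (k : Int)) (some ((k : Int) + 2))

-- B's loop body, over an Int counter (exactly the port's lambda)
def bodyI (s : List Char) (st : PySem.Dict (List Char) Int × Bool × Bool) (k : Int) :
    PySem.Dict (List Char) Int × Bool × Bool :=
  let p := PySem.List.slice s (some k) (some (k + 2))
  let fp :=
    if PySem.Dict.contains st.1 p then
      (st.1, if PySem.Dict.getD st.1 p 0 ≤ k - 2 then true else st.2.1)
    else
      (PySem.Dict.insert st.1 p k, st.2.1)
  let hs :=
    if 1 ≤ k ∧ PySem.List.pyGet? s (k - 1) = PySem.List.pyGet? s (k + 1) then true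
    else st.2.2
  (fp.1, fp.2, hs)

-- B's loop body over the Nat counter delivered by the range
def bodyN (s : List Char) (st : PySem.Dict (List Char) Int × Bool × Bool) (k : Nat) :
    PySem.Dict (List Char) Int × Bool × Bool :=
  bodyI s st ((0 : Int) + (k : Int))

def bInit : PySem.Dict (List Char) Int × Bool × Bool := (PySem.Dict.empty, false, false)

-- "a non-overlapping repeated pair occurs with its right copy at a position < m"
def repP (s : List Char) (m : Nat) : Prop :=
  ∃ j, j < m ∧ ∃ i, i + 2 ≤ j ∧ pairAt s i = pairAt s j

-- "a sandwiched letter xyx is centred at some position k < m"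
def sandP (s : List Char) (m : Nat) : Prop :=
  ∃ k, 1 ≤ k ∧ k < m ∧ s[k - 1]? = s[k + 1]?

theorem bodyN_eq (s : List Char) (st : PySem.Dict (List Char) Int × Bool × Bool) (k : Nat) :
    bodyN s st k =
      ((if PySem.Dict.contains st.1 (pairAt s k) then st.1
        else PySem.Dict.insert st.1 (pairAt s k) (k : Int)),
       (if PySem.Dict.contains st.1 (pairAt s k) then
          (if PySem.Dict.getD st.1 (pairAt s k) 0 ≤ (k : Int) - 2 then true else st.2.1)
        else st.2.1),
       (if 1 ≤ (k : Int) ∧ PySem.List.pyGet? s ((k : Int) - 1) = PySem.List.pyGet? s ((k : Int) + 1)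
        then true else st.2.2)) := by
  simp only [bodyN, bodyI, zero_add, pairAt]
  cases hc : PySem.Dict.contains st.1 (PySem.List.slice s (some (k : Int)) (some ((k : Int) + 2))) <;>
    simp [hc]
  rfl

theorem pairAt_eq (s : List Char) (k : Nat) (h : k + 1 < s.length) :
    pairAt s k = [s[k], s[k + 1]] := by
  have h2 : ((k : Int) + 2) = ((k + 2 : Nat) : Int) := by push_cast; ring
  rw [pairAt, h2, PySem.List.slice_natCast]
  apply List.ext_getElem
  · simp; omega
  · intro i hi1 hi2
    simp only [List.length_take, List.length_drop] at hi1
    have hi : i < 2 := by omega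
    interval_cases i <;> simp [List.getElem_take, List.getElem_drop]

theorem find?_range_spec (p : Nat → Bool) (m i0 : Nat)
    (h : (List.range m).find? p = some i0) :
    p i0 = true ∧ i0 < m ∧ ∀ i < i0, p i = false := by
  induction m with
  | zero => simp at h
  | succ m ih =>
    rw [List.range_succ, List.find?_append] at h
    cases hf : (List.range m).find? p with
    | some j =>
      rw [hf] at h
      simp at h
      subst h
      obtain ⟨h1, h2, h3⟩ := ih hf
      exact ⟨h1, by omega, h3⟩
    | none =>
      rw [hf] at h
      simp at h
      obtain ⟨hpm, rfl⟩ := h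
      refine ⟨hpm, by omega, fun i hi => ?_⟩
      have := List.find?_eq_none.mp hf i (List.mem_range.mpr hi)
      simpa using this

theorem repP_succ (s : List Char) (m : Nat) :
    repP s (m + 1) ↔ repP s m ∨ ∃ i, i + 2 ≤ m ∧ pairAt s i = pairAt s m := by
  constructor
  · rintro ⟨j, hj, i, hij, he⟩
    rcases Nat.lt_succ_iff_lt_or_eq.mp hj with h | h
    · exact Or.inl ⟨j, h, i, hij, he⟩
    · subst h; exact Or.inr ⟨i, hij, he⟩
  · rintro (⟨j, hj, i, hij, he⟩ | ⟨i, hij, he⟩)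
    · exact ⟨j, by omega, i, hij, he⟩
    · exact ⟨m, by omega, i, hij, he⟩

theorem sandP_succ (s : List Char) (m : Nat) :
    sandP s (m + 1) ↔ sandP s m ∨ (1 ≤ m ∧ s[m - 1]? = s[m + 1]?) := by
  constructor
  · rintro ⟨k, hk1, hk2, he⟩
    rcases Nat.lt_succ_iff_lt_or_eq.mp hk2 with h | h
    · exact Or.inl ⟨k, hk1, h, he⟩
    · subst h; exact Or.inr ⟨hk1, he⟩
  · rintro (⟨k, hk1, hk2, he⟩ | ⟨h1, he⟩)
    · exact ⟨k, hk1, by omega, he⟩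
    · exact ⟨m, h1, by omega, he⟩

theorem bInv (s : List Char) (m : Nat) :
    (∀ p, ((List.range m).foldl (bodyN s) bInit).1.get? p
        = ((List.range m).find? (fun i => pairAt s i == p)).map (fun i => (i : Int)))
    ∧ (((List.range m).foldl (bodyN s) bInit).2.1 = true ↔ repP s m)
    ∧ (((List.range m).foldl (bodyN s) bInit).2.2 = true ↔ sandP s m) := by
  induction m with
  | zero =>
    refine ⟨fun p => by simp [bInit, PySem.Dict.get?_empty], ?_, ?_⟩
    · simp only [List.range_zero, List.foldl_nil, bInit]
      constructor
      · intro h; exact absurd h (by simp)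
      · rintro ⟨j, hj, -⟩; omega
    · simp only [List.range_zero, List.foldl_nil, bInit]
      constructor
      · intro h; exact absurd h (by simp)
      · rintro ⟨k, -, hk, -⟩; omega
  | succ m ih =>
    obtain ⟨ihd, ihr, ihs⟩ := ih
    rw [List.range_succ, List.foldl_append, List.foldl_cons, List.foldl_nil]
    set st := (List.range m).foldl (bodyN s) bInit with hst
    rw [bodyN_eq]
    have hsand :
        ((if 1 ≤ (m : Int) ∧ PySem.List.pyGet? s ((m : Int) - 1) = PySem.List.pyGet? s ((m : Int) + 1)
          then true else st.2.2) = true) ↔ sandP s (m + 1) := by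
      by_cases hm1 : 1 ≤ m
      · have e1 : ((m : Int) - 1) = ((m - 1 : Nat) : Int) := by omega
        have e2 : ((m : Int) + 1) = ((m + 1 : Nat) : Int) := by omega
        rw [e1, e2, PySem.List.pyGet?_natCast, PySem.List.pyGet?_natCast]
        split_ifs with hcnd
        · exact iff_of_true rfl ((sandP_succ s m).mpr (Or.inr ⟨hm1, hcnd.2⟩))
        · refine ihs.trans ?_
          rw [sandP_succ]
          constructor
          · exact Or.inl
          · rintro (h | ⟨h1, h2⟩)
            · exact h
            · exact absurd ⟨by exact_mod_cast hm1, h2⟩ hcnd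
      · rw [if_neg (by rintro ⟨h, -⟩; omega)]
        refine ihs.trans ?_
        rw [sandP_succ]
        constructor
        · exact Or.inl
        · rintro (h | ⟨h1, -⟩)
          · exact h
          · exact absurd h1 hm1
    cases hc : PySem.Dict.contains st.1 (pairAt s m) with
    | true =>
      rw [PySem.Dict.contains_eq_isSome_get?, ihd] at hc
      cases hfind : (List.range m).find? (fun i => pairAt s i == pairAt s m) with
      | none => rw [hfind] at hc; simp at hc
      | some i0 =>
        obtain ⟨hp0, hlt0, hmin0⟩ := find?_range_spec _ _ _ hfind
        have hpe0 : pairAt s i0 = pairAt s m := by simpa using hp0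
        have hgetD : PySem.Dict.getD st.1 (pairAt s m) 0 = (i0 : Int) := by
          rw [PySem.Dict.getD_eq_get?_getD, ihd, hfind]; rfl
        have hiff : (∃ i, i + 2 ≤ m ∧ pairAt s i = pairAt s m) ↔ i0 + 2 ≤ m := by
          constructor
          · rintro ⟨i, hi, he⟩
            have hle : i0 ≤ i := by
              by_contra hlt
              have := hmin0 i (by omega)
              simp [he] at this
            omega
          · intro h; exact ⟨i0, h, hpe0⟩
        refine ⟨?_, ?_, by simpa using hsand⟩
        · intro p
          simp only
          rw [if_pos trivial]
          rw [List.find?_append]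
          by_cases hpp : pairAt s m = p
          · subst hpp
            rw [ihd (pairAt s m), hfind]
            rfl
          · cases hf : (List.range m).find? (fun i => pairAt s i == p) with
            | some j => rw [ihd p, hf]; rfl
            | none =>
              rw [ihd p, hf]
              simp [hpp]
        · simp only
          rw [if_pos trivial, hgetD]
          split_ifs with hle
          · exact iff_of_true rfl ((repP_succ s m).mpr (Or.inr (hiff.mpr (by omega))))
          · refine ihr.trans ?_
            rw [repP_succ]
            constructor
            · exact Or.inl
            · rintro (h | h)
              · exact h
              · exact absurd (hiff.mp h) (by omega)
    | false =>
      have hnone : (List.range m).find? (fun i => pairAt s i == pairAt s m) = none := by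
        rw [PySem.Dict.contains_eq_isSome_get?, ihd] at hc
        cases hf : (List.range m).find? (fun i => pairAt s i == pairAt s m) with
        | some j => rw [hf] at hc; simp at hc
        | none => rfl
      refine ⟨?_, ?_, by simpa using hsand⟩
      · intro p
        simp only
        rw [if_neg (by simp), List.find?_append]
        by_cases hpp : pairAt s m = p
        · subst hpp
          rw [PySem.Dict.get?_insert_self, hnone]
          simp
        · rw [PySem.Dict.get?_insert_of_ne (hne := fun he => hpp he.symm)]
          cases hf : (List.range m).find? (fun i => pairAt s i == p) with
          | some j => rw [ihd p, hf]; rfl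
          | none =>
            rw [ihd p, hf]
            simp [hpp]
      · simp only
        rw [if_neg (by simp)]
        have hno : ¬ ∃ i, i + 2 ≤ m ∧ pairAt s i = pairAt s m := by
          rintro ⟨i, hi, he⟩
          have := List.find?_eq_none.mp hnone i (List.mem_range.mpr (by omega))
          simp [he] at this
        refine ihr.trans ?_
        rw [repP_succ]
        constructor
        · exact Or.inl
        · rintro (h | h)
          · exact h
          · exact absurd h hno

theorem alt_char (str : String) :
    (isNice2_alt str = true)
      ↔ (repP str.toList (str.toList.length - 1) ∧ sandP str.toList (str.toList.length - 1)) := by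
  have hfold : isNice2_alt str =
      (((List.range (str.toList.length - 1)).foldl (bodyN str.toList) bInit).2.1
        && ((List.range (str.toList.length - 1)).foldl (bodyN str.toList) bInit).2.2) := by
    simp only [isNice2_alt]
    rw [PySem.List.pyRange_one, sub_zero,
      show (((str.toList.length : Int)) - 1).toNat = str.toList.length - 1 by omega,
      List.foldl_map]
    rfl
  rw [hfold]
  obtain ⟨-, hr, hs⟩ := bInv str.toList (str.toList.length - 1)
  rw [Bool.and_eq_true]
  exact and_congr hr hs

theorem sum_ones {α : Type} (l : List α) : (l.map (fun _ => (1 : Int))).sum = l.length := by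
  induction l with
  | nil => simp
  | cons x t ih => simp [ih]; omega

theorem a_char (str : String) :
    (isNice2 str = true)
      ↔ ((∃ i ∈ PySem.List.pyRange 0 ((str.toList.length : Int) - 3) 1,
            ∃ j ∈ PySem.List.pyRange (i + 2) ((str.toList.length : Int) - 1) 1,
              PySem.List.pyGet? str.toList i = PySem.List.pyGet? str.toList j ∧
              PySem.List.pyGet? str.toList (i + 1) = PySem.List.pyGet? str.toList (j + 1))
          ∧ (∃ i ∈ PySem.List.pyRange 0 ((str.toList.length : Int) - 2) 1,
              PySem.List.pyGet? str.toList i = PySem.List.pyGet? str.toList (i + 2))) := by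
  set s := str.toList with hsdef
  set n : Int := (s.length : Int) with hn
  simp only [isNice2]
  rw [← List.map_flatMap, sum_ones, sum_ones]
  set L1 := (PySem.List.pyRange 0 (n - 3) 1).flatMap (fun i =>
      (PySem.List.pyRange (i + 2) (n - 1) 1).filter (fun j =>
        (PySem.List.pyGet? s i, PySem.List.pyGet? s (i + 1)) ==
        (PySem.List.pyGet? s j, PySem.List.pyGet? s (j + 1)))) with hL1
  set L2 := (PySem.List.pyRange 0 (n - 2) 1).filter (fun i =>
        PySem.List.pyGet? s i == PySem.List.pyGet? s (i + 2)) with hL2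
  have hA : L1 ≠ [] ↔ (∃ i ∈ PySem.List.pyRange 0 (n - 3) 1,
      ∃ j ∈ PySem.List.pyRange (i + 2) (n - 1) 1,
        PySem.List.pyGet? s i = PySem.List.pyGet? s j ∧
        PySem.List.pyGet? s (i + 1) = PySem.List.pyGet? s (j + 1)) := by
    constructor
    · intro h
      obtain ⟨a, ha⟩ := List.exists_mem_of_ne_nil L1 h
      rw [hL1] at ha
      obtain ⟨i, hi, haf⟩ := List.mem_flatMap.mp ha
      obtain ⟨haj, hp⟩ := List.mem_filter.mp haf
      refine ⟨i, hi, a, haj, ?_⟩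
      simpa using hp
    · rintro ⟨i, hi, j, hj, hp1, hp2⟩
      intro hnil
      have hjm : j ∈ L1 := by
        rw [hL1]
        exact List.mem_flatMap.mpr ⟨i, hi, List.mem_filter.mpr ⟨hj, by simp [hp1, hp2]⟩⟩
      rw [hnil] at hjm
      simp at hjm
  have hB : L2 ≠ [] ↔ (∃ i ∈ PySem.List.pyRange 0 (n - 2) 1,
      PySem.List.pyGet? s i = PySem.List.pyGet? s (i + 2)) := by
    constructor
    · intro h
      obtain ⟨a, ha⟩ := List.exists_mem_of_ne_nil L2 h
      rw [hL2] at ha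
      obtain ⟨ham, hp⟩ := List.mem_filter.mp ha
      exact ⟨a, ham, by simpa using hp⟩
    · rintro ⟨i, hi, hp⟩
      intro hnil
      have him : i ∈ L2 := by
        rw [hL2]; exact List.mem_filter.mpr ⟨hi, by simpa using hp⟩
      rw [hnil] at him
      simp at him
  split_ifs with hcond
  · simp only [Bool.or_eq_true, decide_eq_true_eq] at hcond
    constructor
    · intro h; exact absurd h (by simp)
    · rintro ⟨h1, h2⟩
      have hn1 : L1 ≠ [] := hA.mpr h1
      have hn2 : L2 ≠ [] := hB.mpr h2
      have hp1 : 0 < L1.length := List.length_pos_of_ne_nil hn1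
      have hp2 : 0 < L2.length := List.length_pos_of_ne_nil hn2
      rcases hcond with h | h <;> omega
  · rw [Bool.or_eq_true, not_or] at hcond
    obtain ⟨hc1, hc2⟩ := hcond
    simp only [decide_eq_true_eq, not_lt] at hc1 hc2
    refine iff_of_true rfl ⟨hA.mp ?_, hB.mp ?_⟩
    · intro he; rw [he] at hc1; simp at hc1
    · intro he; rw [he] at hc2; simp at hc2

theorem iff1 (s : List Char) :
    (∃ i ∈ PySem.List.pyRange 0 ((s.length : Int) - 3) 1,
       ∃ j ∈ PySem.List.pyRange (i + 2) ((s.length : Int) - 1) 1,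
         PySem.List.pyGet? s i = PySem.List.pyGet? s j ∧
         PySem.List.pyGet? s (i + 1) = PySem.List.pyGet? s (j + 1))
    ↔ repP s (s.length - 1) := by
  constructor
  · rintro ⟨i, hi, j, hj, h1, h2⟩
    rw [PySem.List.mem_pyRange_one] at hi hj
    obtain ⟨hi0, hi3⟩ := hi
    obtain ⟨hj2, hj1⟩ := hj
    set a := i.toNat with ha
    set b := j.toNat with hb
    have hia : i = (a : Int) := by omega
    have hjb : j = (b : Int) := by omega
    have ha1 : a + 1 < s.length := by omega
    have hb1 : b + 1 < s.length := by omega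
    refine ⟨b, by omega, a, by omega, ?_⟩
    rw [pairAt_eq s a ha1, pairAt_eq s b hb1]
    rw [hia, hjb] at h1 h2
    rw [PySem.List.pyGet?_natCast, PySem.List.pyGet?_natCast] at h1
    rw [show ((a : Int) + 1) = ((a + 1 : Nat) : Int) by push_cast; ring,
        show ((b : Int) + 1) = ((b + 1 : Nat) : Int) by push_cast; ring,
        PySem.List.pyGet?_natCast, PySem.List.pyGet?_natCast] at h2
    rw [List.getElem?_eq_getElem (by omega), List.getElem?_eq_getElem (by omega)] at h1
    rw [List.getElem?_eq_getElem ha1, List.getElem?_eq_getElem hb1] at h2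
    simp only [Option.some.injEq] at h1 h2
    rw [h1, h2]
  · rintro ⟨b, hbm, a, hab, he⟩
    have hb1 : b + 1 < s.length := by omega
    have ha1 : a + 1 < s.length := by omega
    refine ⟨(a : Int), ?_, (b : Int), ?_, ?_⟩
    · rw [PySem.List.mem_pyRange_one]; omega
    · rw [PySem.List.mem_pyRange_one]; omega
    · rw [pairAt_eq s a ha1, pairAt_eq s b hb1] at he
      simp only [List.cons.injEq, and_true] at he
      obtain ⟨e1, e2⟩ := he
      constructor
      · rw [PySem.List.pyGet?_natCast, PySem.List.pyGet?_natCast,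
            List.getElem?_eq_getElem (by omega), List.getElem?_eq_getElem (by omega), e1]
      · rw [show ((a : Int) + 1) = ((a + 1 : Nat) : Int) by push_cast; ring,
            show ((b : Int) + 1) = ((b + 1 : Nat) : Int) by push_cast; ring,
            PySem.List.pyGet?_natCast, PySem.List.pyGet?_natCast,
            List.getElem?_eq_getElem ha1, List.getElem?_eq_getElem hb1, e2]

theorem iff2 (s : List Char) :
    (∃ i ∈ PySem.List.pyRange 0 ((s.length : Int) - 2) 1,
       PySem.List.pyGet? s i = PySem.List.pyGet? s (i + 2)) ↔ sandP s (s.length - 1) := by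
  constructor
  · rintro ⟨i, hi, h1⟩
    rw [PySem.List.mem_pyRange_one] at hi
    set a := i.toNat with ha
    have hia : i = (a : Int) := by omega
    refine ⟨a + 1, by omega, by omega, ?_⟩
    rw [show a + 1 - 1 = a by omega, show a + 1 + 1 = a + 2 by omega]
    rw [hia] at h1
    rw [show ((a : Int) + 2) = ((a + 2 : Nat) : Int) by push_cast; ring,
        PySem.List.pyGet?_natCast, PySem.List.pyGet?_natCast] at h1
    exact h1
  · rintro ⟨k, hk1, hkm, he⟩
    refine ⟨((k - 1 : Nat) : Int), ?_, ?_⟩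
    · rw [PySem.List.mem_pyRange_one]; omega
    · rw [show (((k - 1 : Nat) : Int) + 2) = ((k + 1 : Nat) : Int) by omega,
          PySem.List.pyGet?_natCast, PySem.List.pyGet?_natCast]
      exact he

theorem isNice2_eq (str : String) : isNice2 str = isNice2_alt str := by
  have hiff : (isNice2 str = true) ↔ (isNice2_alt str = true) :=
    (a_char str).trans ((and_congr (iff1 str.toList) (iff2 str.toList)).trans (alt_char str).symm)
  cases hx : isNice2 str <;> cases hy : isNice2_alt str <;> simp_all

-- ===== VERDICT (by name: the statement is the Claim_ definition above) =====
theorem isNice2_spec : Claim_equal_isNice2 := by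
  intro str _
  show isNice2 str = isNice2_alt str
  exact isNice2_eq str
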